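-- pv_equiv track=rewrite | github.com/chinnichaitanya/NLP-SpellChecker | ProjectSubmission/WordCheck/bin/editex.py | editexDistance
-- ===== SOURCE A (Python) =====
-- def editexlettersCode(l1, l2):
-- 	num = [0, 0]
-- 	letters = [l1, l2]
-- 	for index in [0, 1]:
-- 		if(letters[index] == 'a' or letters[index] == 'e' or letters[index] == 'i' or letters[index] == 'o' or letters[index] == 'u' or letters[index] == 'y'):
-- 			num[index] += pow(2, 9)
-- 		if(letters[index] == 'b' or letters[index] == 'p'):
-- 			num[index] += pow(2, 8)
-- 		if(letters[index] == 'c' or letters[index] == 'k' or letters[index] == 'q'):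
-- 			num[index] += pow(2, 7)
-- 		if(letters[index] == 'd' or letters[index] == 't'):
-- 			num[index] += pow(2, 6)
-- 		if(letters[index] == 'l' or letters[index] == 'r'):
-- 			num[index] += pow(2, 5)
-- 		if(letters[index] == 'm' or letters[index] == 'n'):
-- 			num[index] += pow(2, 4)
-- 		if(letters[index] == 'g' or letters[index] == 'j'):
-- 			num[index] += pow(2, 3)
-- 		if(letters[index] == 'f' or letters[index] == 'p' or letters[index] == 'v'):
-- 			num[index] += pow(2, 2)
-- 		if(letters[index] == 'x' or letters[index] == 's' or letters[index] == 'z'):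
-- 			num[index] += pow(2, 1)
-- 		if(letters[index] == 'c' or letters[index] == 's' or letters[index] == 'z'):
-- 			num[index] += pow(2, 0)
-- 	if((num[0] & num[1]) > 0):
-- 		return True
-- 	else:
-- 		return False
--
-- def d(a, b):
-- 	if(a == b):
-- 		return 0
-- 	elif(editexlettersCode(a, b) or ((a == 'h' or a == 'w') and  a != b)):
-- 		return 1
-- 	else:
-- 		return 2
--
-- def r(a, b):
-- 	if(a == b):
-- 		return 0
-- 	elif(editexlettersCode(a, b)):
-- 		return 1
-- 	else:
-- 		return 2
--
-- def editexDistance(s, t):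
--     m, n = len(s), len(t)
--     memo = []
--     for l in range(0, m):
--     	temp = []
--     	for k in range(0, n):
--     		temp.append(0)
--     	memo.append(temp)
--     for i in range(0, m):
--         for j in range(0, n):
--             if(i==0 and j==0):
--             	memo[i][j] = r(s[0], t[0])
--             elif(j==0):
--             	memo[i][j] = memo[i-1][j] + d(s[i-1], s[i])
--             elif(i==0):
--             	memo[i][j] = memo[i][j-1] + d(t[j-1], t[j])
--             else:
--             	memo[i][j] = min(memo[i-1][j]+d(s[i-1], s[i]),
--                                memo[i][j-1]+d(t[j-1], t[j]),
--                                memo[i-1][j-1]+r(s[i], t[j]))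
--     return memo[m-1][n-1]
-- ===== SOURCE B (Python) =====
-- _GROUPS = ("aeiouy", "bp", "ckq", "dt", "lr", "mn", "gj", "fpv", "xsz", "csz")
--
--
-- def _similar(a, b):
--     return any(a in g and b in g for g in _GROUPS)
--
--
-- def _d(a, b):
--     if a == b:
--         return 0
--     if _similar(a, b) or a == 'h' or a == 'w':
--         return 1
--     return 2
--
--
-- def _r(a, b):
--     if a == b:
--         return 0
--     return 1 if _similar(a, b) else 2
--
--
-- def editexDistance(s, t):
--     memo = {}
--
--     def solve(i, j):
--         if (i, j) in memo:
--             return memo[(i, j)]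
--         if i == 0 and j == 0:
--             res = _r(s[0], t[0])
--         elif j == 0:
--             res = solve(i - 1, j) + _d(s[i - 1], s[i])
--         elif i == 0:
--             res = solve(i, j - 1) + _d(t[j - 1], t[j])
--         else:
--             res = min(solve(i - 1, j) + _d(s[i - 1], s[i]),
--                       solve(i, j - 1) + _d(t[j - 1], t[j]),
--                       solve(i - 1, j - 1) + _r(s[i], t[j]))
--         memo[(i, j)] = res
--         return res
--
--     return solve(len(s) - 1, len(t) - 1)
-- ===== Notes on version B (the rewrite author's own statement) =====
-- stated objective: alternative
-- what changed: B replaces A's bottom-up double loop filling a full m*n table by a top-down memoized recursion solve(i,j) caching in a dict, and replaces the ten-if bitmask letter coding by a direct any-over-phonetic-group-strings membership test.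
import Mathlib
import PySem

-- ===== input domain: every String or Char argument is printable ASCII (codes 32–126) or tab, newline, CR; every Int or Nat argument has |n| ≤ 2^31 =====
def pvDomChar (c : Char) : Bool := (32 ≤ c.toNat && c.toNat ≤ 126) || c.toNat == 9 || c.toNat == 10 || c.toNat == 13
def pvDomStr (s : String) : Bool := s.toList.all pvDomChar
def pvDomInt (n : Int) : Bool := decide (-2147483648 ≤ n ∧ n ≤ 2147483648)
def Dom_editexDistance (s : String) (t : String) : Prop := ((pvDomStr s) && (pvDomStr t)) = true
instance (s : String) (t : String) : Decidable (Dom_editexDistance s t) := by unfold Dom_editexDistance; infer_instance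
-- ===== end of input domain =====

-- B replaces A's bottom-up full-table double loop by a top-down memoized recursion
-- (a dict-cached solve(i,j)), and the ten-if bitmask letter coding by a direct
-- membership test over the phonetic group strings (objective: alternative decomposition).

-- ===== PORT A =====

-- editexlettersCode: the per-letter accumulator of the Python loop body (sum of the ten ifs)
def pvNumA (c : Char) : Nat :=
  (if c = 'a' ∨ c = 'e' ∨ c = 'i' ∨ c = 'o' ∨ c = 'u' ∨ c = 'y' then 512 else 0) +
  (if c = 'b' ∨ c = 'p' then 256 else 0) +
  (if c = 'c' ∨ c = 'k' ∨ c = 'q' then 128 else 0) +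
  (if c = 'd' ∨ c = 't' then 64 else 0) +
  (if c = 'l' ∨ c = 'r' then 32 else 0) +
  (if c = 'm' ∨ c = 'n' then 16 else 0) +
  (if c = 'g' ∨ c = 'j' then 8 else 0) +
  (if c = 'f' ∨ c = 'p' ∨ c = 'v' then 4 else 0) +
  (if c = 'x' ∨ c = 's' ∨ c = 'z' then 2 else 0) +
  (if c = 'c' ∨ c = 's' ∨ c = 'z' then 1 else 0)

def pvLettersCodeA (l1 l2 : Char) : Bool := decide (0 < pvNumA l1 &&& pvNumA l2)

def pvDA (a b : Char) : Int :=
  if a = b then 0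
  else if pvLettersCodeA a b = true ∨ ((a = 'h' ∨ a = 'w') ∧ a ≠ b) then 1
  else 2

def pvRA (a b : Char) : Int :=
  if a = b then 0
  else if pvLettersCodeA a b = true then 1
  else 2

-- memo[i][j] with the 0 default never used on in-range indices
def pvMget (memo : List (List Int)) (i j : Nat) : Int := (memo.getD i []).getD j 0

-- the body of A's double loop (branches in source order)
def pvCellA (sl tl : List Char) (memo : List (List Int)) (i j : Nat) : Int :=
  if i = 0 ∧ j = 0 then pvRA (sl.getD 0 ' ') (tl.getD 0 ' ')
  else if j = 0 then pvMget memo (i-1) j + pvDA (sl.getD (i-1) ' ') (sl.getD i ' ')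
  else if i = 0 then pvMget memo i (j-1) + pvDA (tl.getD (j-1) ' ') (tl.getD j ' ')
  else min (pvMget memo (i-1) j + pvDA (sl.getD (i-1) ' ') (sl.getD i ' '))
       (min (pvMget memo i (j-1) + pvDA (tl.getD (j-1) ' ') (tl.getD j ' '))
            (pvMget memo (i-1) (j-1) + pvRA (sl.getD i ' ') (tl.getD j ' ')))

def editexDistance (s : String) (t : String) : Int :=
  let sl := s.toList
  let tl := t.toList
  let m := sl.length
  let n := tl.length
  let memo0 : List (List Int) :=
    (List.range m).foldl
      (fun acc _ => acc ++ [(List.range n).foldl (fun tmp _ => tmp ++ [(0 : Int)]) []]) []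
  let memo :=
    (List.range m).foldl (fun mem i =>
      (List.range n).foldl (fun mem2 j =>
        mem2.set i ((mem2.getD i []).set j (pvCellA sl tl mem2 i j))) mem) memo0
  pvMget memo (m - 1) (n - 1)

-- ===== PORT B =====

-- _GROUPS, as lists of characters ('a in g' on a Python string = membership in its characters)
def pvGroupsB : List (List Char) :=
  ["aeiouy".toList, "bp".toList, "ckq".toList, "dt".toList, "lr".toList,
   "mn".toList, "gj".toList, "fpv".toList, "xsz".toList, "csz".toList]

-- _similar: any(a in g and b in g for g in _GROUPS)
def pvSimilarB (a b : Char) : Bool := pvGroupsB.any (fun g => g.contains a && g.contains b)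

def pvDB (a b : Char) : Int :=
  if a = b then 0
  else if pvSimilarB a b = true ∨ a = 'h' ∨ a = 'w' then 1
  else 2

def pvRB (a b : Char) : Int :=
  if a = b then 0
  else if pvSimilarB a b = true then 1
  else 2

-- solve(i,j) with the memo dict threaded through (returns the value and the updated dict)
def pvSolveB (sl tl : List Char) (i j : Nat) (memo : PySem.Dict (Nat × Nat) Int) :
    Int × PySem.Dict (Nat × Nat) Int :=
  match hget : memo.get? (i, j) with
  | some v => (v, memo)
  | none =>
    let res : Int × PySem.Dict (Nat × Nat) Int :=
      if h0 : i = 0 ∧ j = 0 then (pvRB (sl.getD 0 ' ') (tl.getD 0 ' '), memo)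
      else if hj : j = 0 then
        let p := pvSolveB sl tl (i - 1) j memo
        (p.1 + pvDB (sl.getD (i - 1) ' ') (sl.getD i ' '), p.2)
      else if hi : i = 0 then
        let p := pvSolveB sl tl i (j - 1) memo
        (p.1 + pvDB (tl.getD (j - 1) ' ') (tl.getD j ' '), p.2)
      else
        let p1 := pvSolveB sl tl (i - 1) j memo
        let p2 := pvSolveB sl tl i (j - 1) p1.2
        let p3 := pvSolveB sl tl (i - 1) (j - 1) p2.2
        (min (p1.1 + pvDB (sl.getD (i - 1) ' ') (sl.getD i ' '))
           (min (p2.1 + pvDB (tl.getD (j - 1) ' ') (tl.getD j ' '))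
                (p3.1 + pvRB (sl.getD i ' ') (tl.getD j ' '))),
         p3.2)
    (res.1, res.2.insert (i, j) res.1)
termination_by i + j
decreasing_by all_goals omega

def editexDistance_alt (s : String) (t : String) : Int :=
  (pvSolveB s.toList t.toList (s.toList.length - 1) (t.toList.length - 1) PySem.Dict.empty).1

-- ===== PRECONDITION & SPEC =====
-- Python A raises IndexError when s or t is empty (memo[-1] on an empty list / empty row).
def Pre_editexDistance (s : String) (t : String) : Prop := s ≠ "" ∧ t ≠ ""
instance (s : String) (t : String) : Decidable (Pre_editexDistance s t) := by unfold Pre_editexDistance; infer_instance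

def pvWitness_editexDistance : String × String := ("gate", "date")

def Spec_editexDistance (s : String) (t : String) (out : Int) : Prop := out = editexDistance_alt s t
instance (s : String) (t : String) (out : Int) : Decidable (Spec_editexDistance s t out) := by unfold Spec_editexDistance; infer_instance

-- ===== CLAIM (what is proved, stated in full; the proofs are below) =====
def Claim_equal_editexDistance : Prop := ∀ (s : String) (t : String), Dom_editexDistance s t → Pre_editexDistance s t → Spec_editexDistance s t (editexDistance s t)

-- ===== LEMMAS AND PROOFS =====

-- the Editex recurrence both programs compute (A's cost functions)
def pvE (sl tl : List Char) : Nat → Nat → Int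
  | 0, 0 => pvRA (sl.getD 0 ' ') (tl.getD 0 ' ')
  | i+1, 0 => pvE sl tl i 0 + pvDA (sl.getD i ' ') (sl.getD (i+1) ' ')
  | 0, j+1 => pvE sl tl 0 j + pvDA (tl.getD j ' ') (tl.getD (j+1) ' ')
  | i+1, j+1 =>
      min (pvE sl tl i (j+1) + pvDA (sl.getD i ' ') (sl.getD (i+1) ' '))
        (min (pvE sl tl (i+1) j + pvDA (tl.getD j ' ') (tl.getD (j+1) ' '))
             (pvE sl tl i j + pvRA (sl.getD (i+1) ' ') (tl.getD j.succ ' ')))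

-- ---- cost functions agree ----

lemma pvSimilar_eq (a b : Char) : pvLettersCodeA a b = pvSimilarB a b := by
  by_cases ha : a ∈ ['a','b','c','d','e','f','g','i','j','k','l','m','n','o','p','q','r','s','t','u','v','x','y','z']
  · by_cases hb : b ∈ ['a','b','c','d','e','f','g','i','j','k','l','m','n','o','p','q','r','s','t','u','v','x','y','z']
    · fin_cases ha <;> fin_cases hb <;> decide
    · simp only [List.mem_cons, List.not_mem_nil, or_false] at hb
      push_neg at hb
      obtain ⟨h1,h2,h3,h4,h5,h6,h7,h8,h9,h10,h11,h12,h13,h14,h15,h16,h17,h18,h19,h20,h21,h22,h23,h24⟩ := hb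
      simp [pvLettersCodeA, pvSimilarB, pvGroupsB, pvNumA,
        h1,h2,h3,h4,h5,h6,h7,h8,h9,h10,h11,h12,h13,h14,h15,h16,h17,h18,h19,h20,h21,h22,h23,h24]
  · simp only [List.mem_cons, List.not_mem_nil, or_false] at ha
    push_neg at ha
    obtain ⟨h1,h2,h3,h4,h5,h6,h7,h8,h9,h10,h11,h12,h13,h14,h15,h16,h17,h18,h19,h20,h21,h22,h23,h24⟩ := ha
    simp [pvLettersCodeA, pvSimilarB, pvGroupsB, pvNumA,
      h1,h2,h3,h4,h5,h6,h7,h8,h9,h10,h11,h12,h13,h14,h15,h16,h17,h18,h19,h20,h21,h22,h23,h24]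

lemma pvD_eq (a b : Char) : pvDB a b = pvDA a b := by
  unfold pvDA pvDB
  rw [pvSimilar_eq]
  by_cases h : a = b <;> simp [h]

lemma pvR_eq (a b : Char) : pvRB a b = pvRA a b := by
  unfold pvRA pvRB
  rw [pvSimilar_eq]

-- ---- generic list helpers ----

lemma foldl_append_replicate {α : Type} (k : Nat) (x : α) (acc : List α) :
    (List.range k).foldl (fun t _ => t ++ [x]) acc = acc ++ List.replicate k x := by
  induction k generalizing acc with
  | zero => simp
  | succ k ih =>
      rw [List.range_succ, List.foldl_append]
      simp [ih, List.replicate_succ' (n := k)]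

-- ---- A's fill loop computes pvE ----

def pvShape (m n : Nat) (memo : List (List Int)) : Prop :=
  memo.length = m ∧ ∀ r ∈ memo, r.length = n

def pvDone (sl tl : List Char) (n : Nat) (P : Nat → Nat → Prop) (memo : List (List Int)) : Prop :=
  ∀ k l, l < n → P k l → pvMget memo k l = pvE sl tl k l

lemma getD_set' {α : Type} (xs : List α) (i k : Nat) (v d : α) :
    (xs.set i v).getD k d = if i = k ∧ i < xs.length then v else xs.getD k d := by
  simp [List.getD_eq_getElem?_getD, List.getElem?_set]
  split_ifs with h1 h2 h3 h4 <;> simp_all <;> omega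

lemma mget_set_self (memo : List (List Int)) (i j : Nat) (v : Int)
    (hi : i < memo.length) (hj : j < (memo.getD i []).length) :
    pvMget (memo.set i ((memo.getD i []).set j v)) i j = v := by
  unfold pvMget
  rw [getD_set', if_pos ⟨rfl, hi⟩, getD_set', if_pos ⟨rfl, hj⟩]

lemma mget_set_ne (memo : List (List Int)) (i j k l : Nat) (v : Int)
    (h : k ≠ i ∨ l ≠ j) :
    pvMget (memo.set i ((memo.getD i []).set j v)) k l = pvMget memo k l := by
  unfold pvMget
  rw [getD_set']
  rcases h with h | h
  · rw [if_neg (by intro hc; exact h hc.1.symm)]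
  · by_cases hk : i = k ∧ i < memo.length
    · rw [if_pos hk, getD_set', if_neg (by intro hc; exact h hc.1.symm), hk.1]
    · rw [if_neg hk]

lemma cellA_eq_E (sl tl : List Char) (m n i j : Nat) (memo : List (List Int))
    (hi : i < m) (hj : j < n)
    (hdone : pvDone sl tl n (fun k l => k < i ∨ (k = i ∧ l < j)) memo) :
    pvCellA sl tl memo i j = pvE sl tl i j := by
  match i, j with
  | 0, 0 => simp [pvCellA, pvE]
  | i'+1, 0 =>
      have h1 : pvMget memo i' 0 = pvE sl tl i' 0 := hdone i' 0 (by omega) (Or.inl (by omega))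
      simp [pvCellA, pvE, h1]
  | 0, j'+1 =>
      have h1 : pvMget memo 0 j' = pvE sl tl 0 j' := hdone 0 j' (by omega) (Or.inr ⟨rfl, by omega⟩)
      simp [pvCellA, pvE, h1]
  | i'+1, j'+1 =>
      have h1 : pvMget memo i' (j'+1) = pvE sl tl i' (j'+1) := hdone i' (j'+1) hj (Or.inl (by omega))
      have h2 : pvMget memo (i'+1) j' = pvE sl tl (i'+1) j' := hdone (i'+1) j' (by omega) (Or.inr ⟨rfl, by omega⟩)
      have h3 : pvMget memo i' j' = pvE sl tl i' j' := hdone i' j' (by omega) (Or.inl (by omega))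
      simp [pvCellA, pvE, h1, h2, h3]

lemma inner_fill (sl tl : List Char) (m n i : Nat) (hi : i < m) :
    ∀ (cnt j0 : Nat) (memo : List (List Int)), j0 + cnt ≤ n →
    pvShape m n memo →
    pvDone sl tl n (fun k l => k < i ∨ (k = i ∧ l < j0)) memo →
    pvShape m n ((List.range' j0 cnt).foldl (fun mem2 j =>
        mem2.set i ((mem2.getD i []).set j (pvCellA sl tl mem2 i j))) memo) ∧
    pvDone sl tl n (fun k l => k < i ∨ (k = i ∧ l < j0 + cnt))
      ((List.range' j0 cnt).foldl (fun mem2 j =>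
        mem2.set i ((mem2.getD i []).set j (pvCellA sl tl mem2 i j))) memo) := by
  intro cnt
  induction cnt with
  | zero =>
      intro j0 memo _ hsh hdone
      simpa using ⟨hsh, hdone⟩
  | succ cnt ih =>
      intro j0 memo hle hsh hdone
      rw [List.range'_succ, List.foldl_cons]
      have hil : i < memo.length := hsh.1 ▸ hi
      have hrowlen : (memo.getD i []).length = n := by
        rw [List.getD_eq_getElem _ _ hil]
        exact hsh.2 _ (memo.getElem_mem hil)
      have hj0 : j0 < n := by omega
      set memo' := memo.set i ((memo.getD i []).set j0 (pvCellA sl tl memo i j0)) with hmemo'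
      have hsh' : pvShape m n memo' := by
        constructor
        · rw [hmemo', List.length_set]; exact hsh.1
        · intro r hr
          rcases List.mem_or_eq_of_mem_set hr with hr | hr
          · exact hsh.2 _ hr
          · rw [hr, List.length_set]; exact hrowlen
      have hdone' : pvDone sl tl n (fun k l => k < i ∨ (k = i ∧ l < j0 + 1)) memo' := by
        intro k l hl hp
        by_cases hkl : k = i ∧ l = j0
        · obtain ⟨hk, hlx⟩ := hkl
          subst hk; subst hlx
          rw [hmemo', mget_set_self _ _ _ _ hil (by rw [hrowlen]; exact hj0)]
          exact cellA_eq_E sl tl m n k l memo hi hj0 hdone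
        · have hne : k ≠ i ∨ l ≠ j0 := by
            by_cases h : k = i
            · exact Or.inr (fun hc => hkl ⟨h, hc⟩)
            · exact Or.inl h
          rw [hmemo', mget_set_ne _ _ _ _ _ _ hne]
          apply hdone k l hl
          rcases hp with hp | ⟨hk, hl2⟩
          · exact Or.inl hp
          · refine Or.inr ⟨hk, ?_⟩
            by_cases hlj : l = j0
            · exact absurd ⟨hk, hlj⟩ hkl
            · omega
      have hmain := ih (j0 + 1) memo' (by omega) hsh' hdone'
      refine ⟨hmain.1, ?_⟩
      intro k l hl hp
      apply hmain.2 k l hl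
      rcases hp with hp | ⟨hk, hl2⟩
      · exact Or.inl hp
      · exact Or.inr ⟨hk, by omega⟩

lemma outer_fill (sl tl : List Char) (m n : Nat) :
    ∀ (cnt i0 : Nat) (memo : List (List Int)), i0 + cnt ≤ m →
    pvShape m n memo →
    pvDone sl tl n (fun k _ => k < i0) memo →
    pvShape m n ((List.range' i0 cnt).foldl (fun mem i =>
        (List.range n).foldl (fun mem2 j =>
          mem2.set i ((mem2.getD i []).set j (pvCellA sl tl mem2 i j))) mem) memo) ∧
    pvDone sl tl n (fun k _ => k < i0 + cnt)
      ((List.range' i0 cnt).foldl (fun mem i =>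
        (List.range n).foldl (fun mem2 j =>
          mem2.set i ((mem2.getD i []).set j (pvCellA sl tl mem2 i j))) mem) memo) := by
  intro cnt
  induction cnt with
  | zero =>
      intro i0 memo _ hsh hdone
      simpa using ⟨hsh, hdone⟩
  | succ cnt ih =>
      intro i0 memo hle hsh hdone
      rw [List.range'_succ, List.foldl_cons]
      have hi0 : i0 < m := by omega
      have hrow := inner_fill sl tl m n i0 hi0 n 0 memo (by omega) hsh
        (by intro k l hl hp
            rcases hp with hp | ⟨_, hl0⟩
            · exact hdone k l hl hp
            · omega)
      rw [← List.range_eq_range'] at hrow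
      have hmain := ih (i0 + 1)
        ((List.range n).foldl (fun mem2 j =>
          mem2.set i0 ((mem2.getD i0 []).set j (pvCellA sl tl mem2 i0 j))) memo)
        (by omega) hrow.1
        (by intro k l hl hp
            apply hrow.2 k l hl
            by_cases hk : k = i0
            · exact Or.inr ⟨hk, by omega⟩
            · exact Or.inl (by omega))
      refine ⟨hmain.1, ?_⟩
      intro k l hl hp
      exact hmain.2 k l hl (by omega)

lemma portA_eq_E (s t : String) (hs : s.toList ≠ []) (ht : t.toList ≠ []) :
    editexDistance s t = pvE s.toList t.toList (s.toList.length - 1) (t.toList.length - 1) := by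
  have hm : 0 < s.toList.length := List.length_pos_iff.mpr hs
  have hn : 0 < t.toList.length := List.length_pos_iff.mpr ht
  unfold editexDistance
  dsimp only
  rw [foldl_append_replicate, foldl_append_replicate, List.nil_append, List.nil_append]
  have hsh0 : pvShape s.toList.length t.toList.length
      (List.replicate s.toList.length (List.replicate t.toList.length (0 : Int))) := by
    refine ⟨List.length_replicate, ?_⟩
    intro r hr
    rw [List.eq_of_mem_replicate hr]
    exact List.length_replicate
  have h := outer_fill s.toList t.toList s.toList.length t.toList.length s.toList.length 0
    (List.replicate s.toList.length (List.replicate t.toList.length (0 : Int))) (by omega) hsh0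
    (by intro k l _ hp; omega)
  rw [← List.range_eq_range'] at h
  exact h.2 (s.toList.length - 1) (t.toList.length - 1) (by omega) (by omega)

-- ---- B's memoized recursion computes pvE ----

-- invariant: every cached value is the recurrence's value
def pvInvB (sl tl : List Char) (memo : PySem.Dict (Nat × Nat) Int) : Prop :=
  ∀ i j v, memo.get? (i, j) = some v → v = pvE sl tl i j

lemma pvE_i0 (sl tl : List Char) (i : Nat) (hi : i ≠ 0) :
    pvE sl tl i 0 = pvE sl tl (i-1) 0 + pvDA (sl.getD (i-1) ' ') (sl.getD i ' ') := by
  obtain ⟨k, rfl⟩ : ∃ k, i = k + 1 := ⟨i - 1, by omega⟩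
  simp [pvE]

lemma pvE_0j (sl tl : List Char) (j : Nat) (hj : j ≠ 0) :
    pvE sl tl 0 j = pvE sl tl 0 (j-1) + pvDA (tl.getD (j-1) ' ') (tl.getD j ' ') := by
  obtain ⟨k, rfl⟩ : ∃ k, j = k + 1 := ⟨j - 1, by omega⟩
  simp [pvE]

lemma pvE_ij (sl tl : List Char) (i j : Nat) (hi : i ≠ 0) (hj : j ≠ 0) :
    pvE sl tl i j =
      min (pvE sl tl (i-1) j + pvDA (sl.getD (i-1) ' ') (sl.getD i ' '))
        (min (pvE sl tl i (j-1) + pvDA (tl.getD (j-1) ' ') (tl.getD j ' '))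
             (pvE sl tl (i-1) (j-1) + pvRA (sl.getD i ' ') (tl.getD j ' '))) := by
  obtain ⟨k, rfl⟩ : ∃ k, i = k + 1 := ⟨i - 1, by omega⟩
  obtain ⟨l, rfl⟩ : ∃ l, j = l + 1 := ⟨j - 1, by omega⟩
  simp [pvE, Nat.succ_eq_add_one]

lemma pvInvB_insert (sl tl : List Char) (memo : PySem.Dict (Nat × Nat) Int)
    (i j : Nat) (v : Int) (hinv : pvInvB sl tl memo) (hv : v = pvE sl tl i j) :
    pvInvB sl tl (memo.insert (i, j) v) := by
  intro a b w hw
  rw [PySem.Dict.get?_insert] at hw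
  split_ifs at hw with hab
  · obtain ⟨ha, hb⟩ := Prod.mk.injEq .. ▸ hab
    cases hw
    subst ha; subst hb
    exact hv
  · exact hinv a b w hw

lemma solveB_correct (sl tl : List Char) :
    ∀ (N i j : Nat) (memo : PySem.Dict (Nat × Nat) Int), i + j ≤ N → pvInvB sl tl memo →
    (pvSolveB sl tl i j memo).1 = pvE sl tl i j ∧ pvInvB sl tl (pvSolveB sl tl i j memo).2 := by
  intro N
  induction N with
  | zero =>
      intro i j memo hle hinv
      have hi : i = 0 := by omega
      have hj : j = 0 := by omega
      subst hi; subst hj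
      rw [pvSolveB]
      cases hget : memo.get? (0, 0) with
      | some v =>
          exact ⟨hinv 0 0 v hget, hinv⟩
      | none =>
          simp only [dif_pos (⟨rfl, rfl⟩ : (0:Nat) = 0 ∧ (0:Nat) = 0)]
          refine ⟨by simp [pvE, pvR_eq], ?_⟩
          exact pvInvB_insert sl tl memo 0 0 _ hinv (by simp [pvE, pvR_eq])
  | succ N ih =>
      intro i j memo hle hinv
      rw [pvSolveB]
      cases hget : memo.get? (i, j) with
      | some v =>
          exact ⟨hinv i j v hget, hinv⟩
      | none =>
          by_cases h0 : i = 0 ∧ j = 0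
          · simp only [dif_pos h0]
            obtain ⟨rfl, rfl⟩ := h0
            refine ⟨by simp [pvE, pvR_eq], ?_⟩
            exact pvInvB_insert sl tl memo 0 0 _ hinv (by simp [pvE, pvR_eq])
          · by_cases hj : j = 0
            · have hi : i ≠ 0 := fun hc => h0 ⟨hc, hj⟩
              subst hj
              rw [dif_neg h0, dif_pos rfl]
              have hp := ih (i - 1) 0 memo (by omega) hinv
              have hv : (pvSolveB sl tl (i-1) 0 memo).1 + pvDA (sl.getD (i-1) ' ') (sl.getD i ' ')
                  = pvE sl tl i 0 := by
                rw [hp.1, ← pvE_i0 sl tl i hi]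
              refine ⟨by rw [pvD_eq]; exact hv, ?_⟩
              exact pvInvB_insert sl tl _ i 0 _ hp.2 (by rw [pvD_eq]; exact hv)
            · by_cases hi : i = 0
              · subst hi
                rw [dif_neg h0, dif_neg hj, dif_pos rfl]
                have hp := ih 0 (j - 1) memo (by omega) hinv
                have hv : (pvSolveB sl tl 0 (j-1) memo).1 + pvDA (tl.getD (j-1) ' ') (tl.getD j ' ')
                    = pvE sl tl 0 j := by
                  rw [hp.1, ← pvE_0j sl tl j hj]
                refine ⟨by rw [pvD_eq]; exact hv, ?_⟩
                exact pvInvB_insert sl tl _ 0 j _ hp.2 (by rw [pvD_eq]; exact hv)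
              · rw [dif_neg h0, dif_neg hj, dif_neg hi]
                have hp1 := ih (i - 1) j memo (by omega) hinv
                have hp2 := ih i (j - 1) (pvSolveB sl tl (i-1) j memo).2 (by omega) hp1.2
                have hp3 := ih (i - 1) (j - 1) (pvSolveB sl tl i (j-1) (pvSolveB sl tl (i-1) j memo).2).2
                  (by omega) hp2.2
                have hv :
                    min ((pvSolveB sl tl (i-1) j memo).1 + pvDB (sl.getD (i-1) ' ') (sl.getD i ' '))
                      (min ((pvSolveB sl tl i (j-1) (pvSolveB sl tl (i-1) j memo).2).1 + pvDB (tl.getD (j-1) ' ') (tl.getD j ' '))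
                           ((pvSolveB sl tl (i-1) (j-1) (pvSolveB sl tl i (j-1) (pvSolveB sl tl (i-1) j memo).2).2).1 + pvRB (sl.getD i ' ') (tl.getD j ' ')))
                    = pvE sl tl i j := by
                  rw [hp1.1, hp2.1, hp3.1, pvD_eq, pvD_eq, pvR_eq, ← pvE_ij sl tl i j hi hj]
                exact ⟨hv, pvInvB_insert sl tl _ i j _ hp3.2 hv⟩

lemma portB_eq_E (s t : String) :
    editexDistance_alt s t = pvE s.toList t.toList (s.toList.length - 1) (t.toList.length - 1) := by
  unfold editexDistance_alt
  exact (solveB_correct s.toList t.toList (s.toList.length - 1 + (t.toList.length - 1)) _ _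
    PySem.Dict.empty (le_refl _) (by intro i j v h; simp [PySem.Dict.get?_empty] at h)).1

-- ===== VERDICT (by name: the statement is the Claim_ definition above) =====
theorem editexDistance_spec : Claim_equal_editexDistance := by
  intro s t _hdom hpre
  unfold Spec_editexDistance
  have hs : s.toList ≠ [] := by
    intro h; exact hpre.1 (String.toList_eq_nil_iff.mp h)
  have ht : t.toList ≠ [] := by
    intro h; exact hpre.2 (String.toList_eq_nil_iff.mp h)
  rw [portA_eq_E s t hs ht, portB_eq_E s t]
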